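-- pv_equiv track=rewrite | github.com/simoncht/rag-transcript | backend/app/api/utils.py | truncate_history_messages
-- ===== SOURCE A (Python) =====
-- def _unpack(msg):
--     """Extract (role, content) from either an ORM object or a tuple."""
--     if isinstance(msg, tuple):
--         return msg[0], msg[1]
--     return msg.role, msg.content
--
-- def truncate_history_messages(messages, truncate_chars=300):
--     """
--     Truncate old assistant messages to save tokens in LLM prompt.
--
--     Keeps the most recent assistant message in full, truncates older ones.
--     User messages are never truncated.
--
--     Args:
--         messages: List of message objects (.role/.content) or (role, content) tuples
--         truncate_chars: Max chars for old assistant messages (0=disabled)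
--
--     Returns:
--         List of (role, content) tuples with truncation applied
--     """
--     if not messages or truncate_chars <= 0:
--         return [_unpack(msg) for msg in messages]
--
--     result = []
--     # Find the index of the last assistant message
--     last_assistant_idx = -1
--     for i in range(len(messages) - 1, -1, -1):
--         role, _ = _unpack(messages[i])
--         if role == "assistant":
--             last_assistant_idx = i
--             break
--
--     for i, msg in enumerate(messages):
--         role, content = _unpack(msg)
--         if (
--             role == "assistant"
--             and i != last_assistant_idx
--             and len(content) > truncate_chars
--         ):
--             content = content[:truncate_chars] + "..."
--         result.append((role, content))
--
--     return result
-- ===== SOURCE B (Python) =====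
-- def _unpack(msg):
--     """Extract (role, content) from either an ORM object or a tuple."""
--     if isinstance(msg, tuple):
--         return msg[0], msg[1]
--     return msg.role, msg.content
--
-- def truncate_history_messages(messages, truncate_chars=300):
--     """Single reverse pass: keep the first assistant message seen from the
--     end in full, truncate every earlier over-long assistant message."""
--     if not messages or truncate_chars <= 0:
--         return [_unpack(msg) for msg in messages]
--
--     buf = []
--     kept_recent = False
--     for msg in reversed(messages):
--         role, content = _unpack(msg)
--         if role == "assistant":
--             if not kept_recent:
--                 kept_recent = True
--             elif len(content) > truncate_chars:
--                 content = content[:truncate_chars] + "..."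
--         buf.append((role, content))
--     buf.reverse()
--     return buf
-- ===== Notes on version B (the rewrite author's own statement) =====
-- stated objective: alternative
-- what changed: Replaces A's two passes (a descending index scan to find the last assistant message, then an enumerate loop comparing each index against it) by one reverse traversal carrying a kept_recent flag, with the buffer reversed at the end; no indices are computed at all.
import Mathlib
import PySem

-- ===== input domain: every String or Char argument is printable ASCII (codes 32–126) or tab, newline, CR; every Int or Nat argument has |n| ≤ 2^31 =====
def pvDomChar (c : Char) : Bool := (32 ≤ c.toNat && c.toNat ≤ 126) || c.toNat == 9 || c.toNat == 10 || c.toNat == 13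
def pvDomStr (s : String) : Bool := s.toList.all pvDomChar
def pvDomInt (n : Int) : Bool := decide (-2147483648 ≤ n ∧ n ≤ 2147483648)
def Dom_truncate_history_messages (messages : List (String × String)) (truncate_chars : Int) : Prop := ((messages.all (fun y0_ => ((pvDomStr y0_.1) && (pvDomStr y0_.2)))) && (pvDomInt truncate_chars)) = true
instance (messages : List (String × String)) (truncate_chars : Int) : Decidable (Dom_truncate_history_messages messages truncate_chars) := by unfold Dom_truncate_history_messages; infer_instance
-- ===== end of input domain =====

-- B replaces A's two passes (find the last assistant index, then truncate by index comparison)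
-- by one reverse traversal with a kept_recent flag; same values, alternative decomposition.

-- ===== PORT A =====
-- _unpack on a (role, content) tuple is just the pair itself
def pvUnpack (msg : String × String) : String × String := (msg.1, msg.2)

-- 'for i in range(len(messages)-1, -1, -1): role,_ = _unpack(messages[i]); if role=="assistant": break'
-- descending index scan with break; the 'none' arm is unreachable (the counter stays ≤ length)
def pvLastAssistantLoop (messages : List (String × String)) : Nat → Int
  | 0 => -1
  | n + 1 =>
    match messages[n]? with
    | some msg => if (pvUnpack msg).1 = "assistant" then (n : Int) else pvLastAssistantLoop messages n
    | none => pvLastAssistantLoop messages n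

-- body of A's 'for i, msg in enumerate(messages)' loop
def pvAStep (t last : Int) (result : List (String × String)) (im : Int × (String × String)) :
    List (String × String) :=
  let role := (pvUnpack im.2).1
  let content := (pvUnpack im.2).2
  let content :=
    if role = "assistant" ∧ im.1 ≠ last ∧ PySem.Str.len content > t
    then String.ofList (PySem.List.slice content.toList none (some t) ++ "...".toList)
    else content
  result ++ [(role, content)]

def truncate_history_messages (messages : List (String × String)) (truncate_chars : Int) : List (String × String) :=
  if messages = [] ∨ truncate_chars ≤ 0 then
    messages.map pvUnpack
  else
    let last_assistant_idx := pvLastAssistantLoop messages messages.length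
    (PySem.List.enumerate messages 0).foldl (pvAStep truncate_chars last_assistant_idx) []

-- ===== PORT B =====
-- body of B's 'for msg in reversed(messages)' loop; state = (buf, kept_recent)
def pvBStep (t : Int) (st : List (String × String) × Bool) (msg : String × String) :
    List (String × String) × Bool :=
  let role := (pvUnpack msg).1
  let content := (pvUnpack msg).2
  if role = "assistant" then
    if st.2 = false then (st.1 ++ [(role, content)], true)
    else if PySem.Str.len content > t then
      (st.1 ++ [(role, String.ofList (PySem.List.slice content.toList none (some t) ++ "...".toList))], st.2)
    else (st.1 ++ [(role, content)], st.2)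
  else (st.1 ++ [(role, content)], st.2)

def truncate_history_messages_alt (messages : List (String × String)) (truncate_chars : Int) : List (String × String) :=
  if messages = [] ∨ truncate_chars ≤ 0 then
    messages.map pvUnpack
  else
    (messages.reverse.foldl (pvBStep truncate_chars) ([], false)).1.reverse

-- ===== PRECONDITION & SPEC =====
def Spec_truncate_history_messages (messages : List (String × String)) (truncate_chars : Int) (out : List (String × String)) : Prop := out = truncate_history_messages_alt messages truncate_chars
instance (messages : List (String × String)) (truncate_chars : Int) (out : List (String × String)) : Decidable (Spec_truncate_history_messages messages truncate_chars out) := by unfold Spec_truncate_history_messages; infer_instance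

-- ===== CLAIM (what is proved, stated in full; the proofs are below) =====
def Claim_equal_truncate_history_messages : Prop := ∀ (messages : List (String × String)) (truncate_chars : Int), Dom_truncate_history_messages messages truncate_chars → Spec_truncate_history_messages messages truncate_chars (truncate_history_messages messages truncate_chars)

-- ===== LEMMAS AND PROOFS =====

-- the per-message truncation both programs apply to an old over-long assistant message
def pvTruncF (t : Int) (p : String × String) : String × String :=
  if p.1 = "assistant" ∧ PySem.Str.len p.2 > t
  then (p.1, String.ofList (PySem.List.slice p.2.toList none (some t) ++ "...".toList))
  else p

-- cons-shaped reading of B's reverse pass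
def pvGB (t : Int) : List (String × String) → Bool → List (String × String)
  | [], _ => []
  | p :: r, kept =>
    if p.1 = "assistant" then
      if kept = false then p :: pvGB t r true
      else pvTruncF t p :: pvGB t r kept
    else p :: pvGB t r kept

theorem pvGB_foldl (t : Int) (r : List (String × String)) (buf : List (String × String)) (kept : Bool) :
    (r.foldl (pvBStep t) (buf, kept)).1 = buf ++ pvGB t r kept := by
  induction r generalizing buf kept with
  | nil => simp [pvGB]
  | cons p r ih =>
    obtain ⟨pr, pc⟩ := p
    rw [List.foldl_cons]
    by_cases h1 : pr = "assistant"
    · subst h1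
      by_cases h2 : kept = false
      · subst h2
        have hs : pvBStep t (buf, false) ("assistant", pc) = (buf ++ [("assistant", pc)], true) := by
          simp [pvBStep, pvUnpack]
        rw [hs, ih, pvGB]
        simp
      · have hk : kept = true := by cases kept <;> simp_all
        subst hk
        by_cases h3 : PySem.Str.len pc > t
        · simp only [PySem.Str.len_eq, String.length_toList] at h3
          have hs : pvBStep t (buf, true) ("assistant", pc)
              = (buf ++ [pvTruncF t ("assistant", pc)], true) := by
            simp [pvBStep, pvUnpack, pvTruncF, h3]
          rw [hs, ih, pvGB]
          simp
        · simp only [PySem.Str.len_eq, String.length_toList] at h3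
          have hs : pvBStep t (buf, true) ("assistant", pc) = (buf ++ [("assistant", pc)], true) := by
            simp [pvBStep, pvUnpack, h3]
          rw [hs, ih, pvGB]
          simp [pvTruncF, h3]
    · have hs : pvBStep t (buf, kept) (pr, pc) = (buf ++ [(pr, pc)], kept) := by
        simp [pvBStep, pvUnpack, h1]
      rw [hs, ih, pvGB]
      simp [h1]

theorem pvGB_true (t : Int) (r : List (String × String)) : pvGB t r true = r.map (pvTruncF t) := by
  induction r with
  | nil => simp [pvGB]
  | cons p r ih =>
    rw [pvGB, List.map_cons, ih]
    by_cases h1 : p.1 = "assistant"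
    · simp [h1, pvTruncF]
    · simp [h1, pvTruncF]

theorem pvGB_noAsst (t : Int) (r : List (String × String)) (h : ∀ p ∈ r, p.1 ≠ "assistant") :
    pvGB t r false = r := by
  induction r with
  | nil => rfl
  | cons p r ih =>
    have h1 : p.1 ≠ "assistant" := h p (by simp)
    rw [pvGB, if_neg h1, ih (fun q hq => h q (by simp [hq]))]

-- B's pass on a list whose first assistant message is a
theorem pvGB_decomp (t : Int) (r2 : List (String × String)) (a : String × String)
    (r1 : List (String × String)) (ha : a.1 = "assistant") (hno : ∀ p ∈ r2, p.1 ≠ "assistant") :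
    pvGB t (r2 ++ a :: r1) false = r2 ++ a :: r1.map (pvTruncF t) := by
  induction r2 with
  | nil => simp [pvGB, ha, pvGB_true]
  | cons q r ih =>
    have h1 : q.1 ≠ "assistant" := hno q (by simp)
    simpa [pvGB, h1] using ih (fun p hp => hno p (by simp [hp]))

-- decomposition at the FIRST assistant message of a list
theorem pvFirstAsst (r : List (String × String)) (h : ∃ p ∈ r, p.1 = "assistant") :
    ∃ r2 a r1, r = r2 ++ a :: r1 ∧ a.1 = "assistant" ∧ ∀ p ∈ r2, p.1 ≠ "assistant" := by
  induction r with
  | nil => simp at h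
  | cons p r ih =>
    by_cases h1 : p.1 = "assistant"
    · exact ⟨[], p, r, by simp, h1, by simp⟩
    · obtain ⟨q, hq, hq1⟩ := h
      rcases List.mem_cons.mp hq with rfl | hq'
      · exact absurd hq1 h1
      · obtain ⟨r2, a, r1, hr, ha, hno⟩ := ih ⟨q, hq', hq1⟩
        exact ⟨p :: r2, a, r1, by simp [hr], ha, by
          intro x hx
          rcases List.mem_cons.mp hx with rfl | hx' <;> [exact h1; exact hno x hx']⟩

theorem pvLastLoop_skip (ms : List (String × String)) (n m : Nat)
    (h : ∀ j, n ≤ j → j < n + m → ∀ p, ms[j]? = some p → p.1 ≠ "assistant") :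
    pvLastAssistantLoop ms (n + m) = pvLastAssistantLoop ms n := by
  induction m with
  | zero => rfl
  | succ m ih =>
    have he : n + (m + 1) = (n + m) + 1 := by omega
    rw [he]
    rw [pvLastAssistantLoop]
    cases hget : ms[n + m]? with
    | none => exact ih (fun j hj hj' p hp => h j hj (by omega) p hp)
    | some p =>
      have hp := h (n + m) (by omega) (by omega) p hget
      simp only [pvUnpack, hp, if_false]
      exact ih (fun j hj hj' q hq => h j hj (by omega) q hq)

theorem pvLastLoop_hit (m1 : List (String × String)) (a : String × String)
    (m2 : List (String × String)) (ha : a.1 = "assistant") :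
    pvLastAssistantLoop (m1 ++ a :: m2) (m1.length + 1) = (m1.length : Int) := by
  rw [pvLastAssistantLoop]
  have hg : (m1 ++ a :: m2)[m1.length]? = some a := by
    rw [List.getElem?_append_right (by omega)]
    simp
  rw [hg]
  simp [pvUnpack, ha]

theorem pvMapA (t last : Int) (ms : List (String × String)) (s : Int)
    (h : ∀ k : Nat, k < ms.length → (s + k : Int) ≠ last) :
    (PySem.List.enumerate ms s).map (fun im => pvAStep t last [] im |>.headI)
      = ms.map (pvTruncF t) := by
  induction ms generalizing s with
  | nil => simp [PySem.List.enumerate_nil]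
  | cons p r ih =>
    rw [PySem.List.enumerate_cons, List.map_cons, List.map_cons]
    have hne : s ≠ last := by simpa using h 0 (by simp)
    have hhd : (pvAStep t last [] (s, p)).headI = pvTruncF t p := by
      obtain ⟨pr, pc⟩ := p
      by_cases h1 : pr = "assistant"
      · subst h1
        by_cases h3 : PySem.Str.len pc > t
        · simp only [PySem.Str.len_eq, String.length_toList] at h3
          simp [pvAStep, pvUnpack, pvTruncF, h3, hne]
        · simp only [PySem.Str.len_eq, String.length_toList] at h3
          simp [pvAStep, pvUnpack, pvTruncF, h3]
      · simp [pvAStep, pvUnpack, pvTruncF, h1]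
    rw [hhd]
    exact congrArg _ (ih (s + 1) (fun k hk => by
      have hh := h (k + 1) (by simpa using Nat.succ_lt_succ hk)
      push_cast at hh ⊢
      intro hc; exact hh (by linarith)))

theorem pvMapA_id (t last : Int) (ms : List (String × String)) (s : Int)
    (h : ∀ p ∈ ms, p.1 ≠ "assistant") :
    (PySem.List.enumerate ms s).map (fun im => pvAStep t last [] im |>.headI) = ms := by
  induction ms generalizing s with
  | nil => simp [PySem.List.enumerate_nil]
  | cons p r ih =>
    rw [PySem.List.enumerate_cons, List.map_cons]
    have h1 : p.1 ≠ "assistant" := h p (by simp)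
    rw [ih (s + 1) (fun q hq => h q (by simp [hq]))]
    simp [pvAStep, pvUnpack, h1]

theorem pvAStep_foldl (t last : Int) (xs : List (Int × (String × String))) :
    xs.foldl (pvAStep t last) [] = xs.map (fun im => (pvAStep t last [] im).headI) := by
  calc xs.foldl (pvAStep t last) []
      = xs.foldl (fun acc im => acc ++ [(pvAStep t last [] im).headI]) [] := by
        congr 1
    _ = xs.map (fun im => (pvAStep t last [] im).headI) := by
        simpa using PySem.List.foldl_append_singleton_eq_map
          (fun im => (pvAStep t last [] im).headI) xs []

-- ===== VERDICT (by name: the statement is the Claim_ definition above) =====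
theorem truncate_history_messages_spec : Claim_equal_truncate_history_messages := by
  intro messages t _
  show truncate_history_messages messages t = truncate_history_messages_alt messages t
  unfold truncate_history_messages truncate_history_messages_alt
  by_cases hg : messages = [] ∨ t ≤ 0
  · simp [hg]
  · simp only [hg, if_false]
    rw [pvGB_foldl, List.nil_append, pvAStep_foldl]
    by_cases hA : ∃ p ∈ messages, p.1 = "assistant"
    · obtain ⟨r2, a, r1, hr, ha, hno⟩ := pvFirstAsst messages.reverse (by
        obtain ⟨p, hp, hp1⟩ := hA; exact ⟨p, by simp [hp], hp1⟩)
      have hms : messages = r1.reverse ++ a :: r2.reverse := by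
        have := congrArg List.reverse hr
        simpa using this
      have hno2 : ∀ p ∈ r2.reverse, p.1 ≠ "assistant" := fun p hp => hno p (by simpa using hp)
      have hlen : messages.length = (r1.reverse.length + 1) + r2.reverse.length := by
        rw [hms]; simp; omega
      have hskip : ∀ j, r1.reverse.length + 1 ≤ j → j < (r1.reverse.length + 1) + r2.reverse.length →
          ∀ p, messages[j]? = some p → p.1 ≠ "assistant" := by
        intro j hj hj' p hp
        rw [hms, List.getElem?_append_right (by simp only [List.length_reverse] at hj ⊢; omega)] at hp
        have hj3 : ∃ k, j - r1.reverse.length = k + 1 := ⟨j - r1.reverse.length - 1, by omega⟩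
        obtain ⟨k, hk⟩ := hj3
        rw [hk] at hp
        simp only [List.getElem?_cons_succ] at hp
        exact hno2 p (List.mem_of_getElem? hp)
      have hlast : pvLastAssistantLoop messages messages.length = (r1.reverse.length : Int) := by
        rw [hlen, pvLastLoop_skip messages (r1.reverse.length + 1) r2.reverse.length hskip,
            hms, pvLastLoop_hit r1.reverse a r2.reverse ha]
      rw [hlast, hms]
      have hrev : (r1.reverse ++ a :: r2.reverse).reverse = r2 ++ a :: r1 := by simp
      rw [hrev, pvGB_decomp t r2 a r1 ha hno]
      rw [PySem.List.enumerate_append, PySem.List.enumerate_cons, List.map_append, List.map_cons]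
      rw [pvMapA t ((r1.reverse.length : Nat) : Int) r1.reverse 0 (by intro k hk; simp only [List.length_reverse] at hk ⊢; omega)]
      rw [pvMapA_id t ((r1.reverse.length : Nat) : Int) r2.reverse (0 + (r1.reverse.length : Int) + 1) hno2]
      have hmid : (pvAStep t (r1.reverse.length : Int) [] (0 + (r1.reverse.length : Int), a)).headI = a := by
        simp [pvAStep, pvUnpack]
      rw [hmid]
      simp [List.reverse_append, List.map_reverse]
    · simp only [not_exists, not_and] at hA
      rw [pvMapA_id t (pvLastAssistantLoop messages messages.length) messages 0 hA, pvGB_noAsst t _ (fun p hp => hA p (by simpa using hp))]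
      simp
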